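-- pv_equiv track=rewrite | github.com/prism-lead/Typing_Tool | generate_bibd.py | pair_cooccurrence
-- ===== SOURCE A (Python) =====
-- def pair_cooccurrence(design, v):
--     """Build v x v pair co-occurrence matrix (1-indexed)."""
--     matrix = [[0] * (v + 1) for _ in range(v + 1)]
--     for task in design:
--         for i in range(len(task)):
--             for j in range(i + 1, len(task)):
--                 a, b = task[i], task[j]
--                 matrix[a][b] += 1
--                 matrix[b][a] += 1
--     return matrix
-- ===== SOURCE B (Python) =====
-- def pair_cooccurrence(design, v):
--     """Build v x v pair co-occurrence matrix (1-indexed)."""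
--     # Pass 1: tally each in-block pair once, in block order, into a table.
--     counts = {}
--     for task in design:
--         rest = list(task)
--         while rest:
--             a = rest.pop(0)
--             for b in rest:
--                 counts[(a, b)] = counts.get((a, b), 0) + 1
--     # Pass 2: allocate the zero matrix and fill it from the table.
--     matrix = [[0] * (v + 1) for _ in range(v + 1)]
--     for (a, b), cnt in counts.items():
--         matrix[a][b] += cnt
--         matrix[b][a] += cnt
--     return matrix
-- ===== Notes on version B (the rewrite author's own statement) =====
-- stated objective: alternative
-- what changed: B separates counting from matrix construction: a first pass tallies each in-block pair once (in block order) into a dict keyed by the ordered pair, and a second pass allocates the zero matrix and fills it by iterating the table's items, writing each count into matrix[a][b] and matrix[b][a], instead of A's in-place double increments into the matrix during pair enumeration.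
import Mathlib
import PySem

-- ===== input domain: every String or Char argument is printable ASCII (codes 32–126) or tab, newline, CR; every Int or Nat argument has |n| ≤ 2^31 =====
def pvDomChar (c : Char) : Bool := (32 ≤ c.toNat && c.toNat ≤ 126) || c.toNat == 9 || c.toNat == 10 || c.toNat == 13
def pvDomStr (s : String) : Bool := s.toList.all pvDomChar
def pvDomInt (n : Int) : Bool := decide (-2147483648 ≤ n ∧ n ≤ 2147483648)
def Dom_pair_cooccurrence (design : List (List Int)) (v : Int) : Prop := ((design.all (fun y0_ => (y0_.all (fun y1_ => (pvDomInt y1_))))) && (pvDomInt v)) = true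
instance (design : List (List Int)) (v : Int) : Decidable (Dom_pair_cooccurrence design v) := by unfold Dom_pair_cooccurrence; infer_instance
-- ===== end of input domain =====

-- B separates counting (a dict tallying each in-block pair once) from matrix construction
-- (a second pass that allocates the zero matrix and writes each tallied count into it); same asymptotic cost as A ("alternative").


-- ===== PORT A =====
-- Python list-index resolution: a negative index counts from the end; exact for -len ≤ i < len
-- (outside that range Python raises IndexError, which Pre_ excludes).
def pvIdx (len : Nat) (i : Int) : Nat := (if i < 0 then i + (len : Int) else i).toNat

-- matrix[a][b] += 1 (exact for -len ≤ a, b < len; Python raises IndexError outside, excluded by Pre_)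
def pvBump (m : List (List Int)) (a b : Int) : List (List Int) :=
  let i := pvIdx m.length a
  let row := m.getD i []
  let j := pvIdx row.length b
  m.set i (row.set j (row.getD j 0 + 1))

-- the nested 'for i / for j in range(i+1, len(task))' loops as the structural recursion on the task list
def pvLoopA (m : List (List Int)) : List Int → List (List Int)
  | [] => m
  | a :: rest => pvLoopA (rest.foldl (fun acc b => pvBump (pvBump acc a b) b a) m) rest

def pair_cooccurrence (design : List (List Int)) (v : Int) : List (List Int) :=
  let matrix := List.replicate (v + 1).toNat (List.replicate (v + 1).toNat (0 : Int))
  design.foldl pvLoopA matrix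

-- ===== PORT B =====
-- pass 1: 'while rest: a = rest.pop(0); for b in rest: counts[(a,b)] = counts.get((a,b),0) + 1'
def pvTally (d : PySem.Dict (Int × Int) Int) : List Int → PySem.Dict (Int × Int) Int
  | [] => d
  | a :: rest => pvTally (rest.foldl (fun d b => d.insert (a, b) (d.getD (a, b) 0 + 1)) d) rest

-- matrix[a][b] += cnt (same Python indexing semantics as pvBump, with a general increment)
def pvAdd (m : List (List Int)) (a b cnt : Int) : List (List Int) :=
  let i := pvIdx m.length a
  let row := m.getD i []
  let j := pvIdx row.length b
  m.set i (row.set j (row.getD j 0 + cnt))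

def pair_cooccurrence_alt (design : List (List Int)) (v : Int) : List (List Int) :=
  let counts := design.foldl pvTally PySem.Dict.empty
  let matrix := List.replicate (v + 1).toNat (List.replicate (v + 1).toNat (0 : Int))
  counts.items.foldl (fun m x => pvAdd (pvAdd m x.1.1 x.1.2 x.2) x.1.2 x.1.1 x.2) matrix

-- ===== PRECONDITION & SPEC =====
-- Exactly A's return domain: every entry of a block of ≥ 2 elements is used as a matrix index, so it must
-- lie in Python's valid index range [-(v+1), v] (A raises IndexError otherwise); blocks of < 2 elements
-- produce no pairs and are unconstrained.
def Pre_pair_cooccurrence (design : List (List Int)) (v : Int) : Prop :=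
  ∀ t ∈ design, 2 ≤ t.length → ∀ e ∈ t, -(v + 1) ≤ e ∧ e ≤ v
instance (design : List (List Int)) (v : Int) : Decidable (Pre_pair_cooccurrence design v) := by
  unfold Pre_pair_cooccurrence; infer_instance

def pvWitness_pair_cooccurrence : List (List Int) × Int := ([[1, 2, 3], [2, 3, 0]], 3)

def Spec_pair_cooccurrence (design : List (List Int)) (v : Int) (out : List (List Int)) : Prop := out = pair_cooccurrence_alt design v
instance (design : List (List Int)) (v : Int) (out : List (List Int)) : Decidable (Spec_pair_cooccurrence design v out) := by unfold Spec_pair_cooccurrence; infer_instance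

-- ===== CLAIM (what is proved, stated in full; the proofs are below) =====
def Claim_equal_pair_cooccurrence : Prop := ∀ (design : List (List Int)) (v : Int), Dom_pair_cooccurrence design v → Pre_pair_cooccurrence design v → Spec_pair_cooccurrence design v (pair_cooccurrence design v)

-- ===== LEMMAS AND PROOFS =====

-- the Int value a Python index resolves to (pvIdx before truncation to Nat)
def pvNorm (n : Nat) (a : Int) : Int := if a < 0 then a + (n : Int) else a

-- an n×n matrix given by a function of the (row, col) indices
def pvGrid (n : Nat) (g : Nat → Nat → Int) : List (List Int) :=
  (List.range n).map (fun r => (List.range n).map (g r))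

-- the matrix described by a count function G on (normalized) index pairs
def pvFill (n : Nat) (G : Int × Int → Int) : List (List Int) :=
  pvGrid n (fun r c => G ((r : Int), (c : Int)) + G ((c : Int), (r : Int)))

theorem pvGrid_congr {n : Nat} {g g' : Nat → Nat → Int}
    (h : ∀ r c, r < n → c < n → g r c = g' r c) : pvGrid n g = pvGrid n g' := by
  unfold pvGrid
  refine List.map_congr_left (fun r hr => ?_)
  exact List.map_congr_left (fun c hc => h r c (List.mem_range.mp hr) (List.mem_range.mp hc))

theorem pvNorm_bounds {n : Nat} {a : Int} (h : -(n : Int) ≤ a ∧ a < (n : Int)) :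
    0 ≤ pvNorm n a ∧ pvNorm n a < (n : Int) := by
  unfold pvNorm; split_ifs <;> omega

theorem pvIdx_eq_pvNorm (n : Nat) (a : Int) : pvIdx n a = (pvNorm n a).toNat := rfl

theorem pvAdd_grid (n : Nat) (g : Nat → Nat → Int) (a b c : Int)
    (ha : -(n : Int) ≤ a ∧ a < (n : Int)) (hb : -(n : Int) ≤ b ∧ b < (n : Int)) :
    pvAdd (pvGrid n g) a b c
      = pvGrid n (fun r c' =>
          if r = (pvNorm n a).toNat ∧ c' = (pvNorm n b).toNat then g r c' + c else g r c') := by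
  have hna := pvNorm_bounds ha
  have hnb := pvNorm_bounds hb
  have han : (pvNorm n a).toNat < n := by omega
  have hbn : (pvNorm n b).toNat < n := by omega
  have hlen : (pvGrid n g).length = n := by simp [pvGrid]
  simp only [pvAdd]
  rw [hlen, pvIdx_eq_pvNorm]
  have hrow : ((pvGrid n g).getD (pvNorm n a).toNat []) = (List.range n).map (g (pvNorm n a).toNat) := by
    rw [List.getD_eq_getElem?_getD]
    simp [pvGrid, han]
  rw [hrow]
  have hrlen : ((List.range n).map (g (pvNorm n a).toNat)).length = n := by simp
  rw [hrlen, pvIdx_eq_pvNorm]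
  unfold pvGrid
  apply List.ext_getElem
  · simp
  · intro i h1 h2
    have hin : i < n := by simpa using h2
    rcases eq_or_ne (pvNorm n a).toNat i with hi | hi
    · subst hi
      rw [List.getElem_set_self]
      simp only [List.getElem_map, List.getElem_range]
      apply List.ext_getElem
      · simp
      · intro j h3 h4
        have hjn : j < n := by simpa using h4
        simp only [List.getElem_map, List.getElem_range]
        rcases eq_or_ne (pvNorm n b).toNat j with hj | hj
        · subst hj
          rw [List.getElem_set_self]
          simp [List.getD_eq_getElem?_getD, hbn]
        · rw [List.getElem_set_ne hj]
          have hj' : j ≠ (pvNorm n b).toNat := fun h => hj h.symm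
          simp [hj']
    · rw [List.getElem_set_ne hi]
      have hi' : i ≠ (pvNorm n a).toNat := fun h => hi h.symm
      simp [hi']

theorem pvAdd2_fill (n : Nat) (G : Int × Int → Int) (a b c : Int)
    (ha : -(n : Int) ≤ a ∧ a < (n : Int)) (hb : -(n : Int) ≤ b ∧ b < (n : Int)) :
    pvAdd (pvAdd (pvFill n G) a b c) b a c
      = pvFill n (fun k => if k = (pvNorm n a, pvNorm n b) then G k + c else G k) := by
  have hna := pvNorm_bounds ha
  have hnb := pvNorm_bounds hb
  unfold pvFill
  rw [pvAdd_grid n _ a b c ha hb, pvAdd_grid n _ b a c hb ha]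
  apply pvGrid_congr
  intro r c' hr hc
  have e1 : ((r : Int) = pvNorm n a) ↔ r = (pvNorm n a).toNat := by omega
  have e2 : ((c' : Int) = pvNorm n b) ↔ c' = (pvNorm n b).toNat := by omega
  have e3 : ((c' : Int) = pvNorm n a) ↔ c' = (pvNorm n a).toNat := by omega
  have e4 : ((r : Int) = pvNorm n b) ↔ r = (pvNorm n b).toNat := by omega
  simp only [Prod.mk.injEq, e1, e2, e3, e4]
  split_ifs <;> omega

theorem pvBump_eq_pvAdd (m : List (List Int)) (a b : Int) : pvBump m a b = pvAdd m a b 1 := rfl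

-- the ordered pairs A's nested index loops enumerate, in order
def pvPairs : List Int → List (Int × Int)
  | [] => []
  | a :: rest => rest.map (fun b => (a, b)) ++ pvPairs rest

theorem pvPairs_mem {t : List Int} {p : Int × Int} (h : p ∈ pvPairs t) :
    2 ≤ t.length ∧ p.1 ∈ t ∧ p.2 ∈ t := by
  induction t with
  | nil => simp [pvPairs] at h
  | cons a rest ih =>
    simp only [pvPairs, List.mem_append, List.mem_map] at h
    rcases h with ⟨b, hb, rfl⟩ | h
    · refine ⟨?_, by simp, by simp [hb]⟩
      cases rest with
      | nil => simp at hb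
      | cons _ _ => simp
    · obtain ⟨hl, h1, h2⟩ := ih h
      exact ⟨by simp; omega, by simp [h1], by simp [h2]⟩

theorem pvLoopA_eq (t : List Int) : ∀ m,
    pvLoopA m t = (pvPairs t).foldl (fun acc p => pvBump (pvBump acc p.1 p.2) p.2 p.1) m := by
  induction t with
  | nil => intro m; rfl
  | cons a rest ih =>
    intro m
    simp only [pvLoopA, pvPairs, List.foldl_append, List.foldl_map]
    exact ih _

theorem pvFoldA_eq (design : List (List Int)) : ∀ m,
    design.foldl pvLoopA m
      = (design.flatMap pvPairs).foldl (fun acc p => pvBump (pvBump acc p.1 p.2) p.2 p.1) m := by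
  induction design with
  | nil => intro m; rfl
  | cons t rest ih =>
    intro m
    simp only [List.foldl_cons, List.flatMap_cons, List.foldl_append, pvLoopA_eq]
    exact ih _

theorem pvTally_eq (t : List Int) : ∀ d,
    pvTally d t = (pvPairs t).foldl (fun d k => d.insert k (d.getD k 0 + 1)) d := by
  induction t with
  | nil => intro d; rfl
  | cons a rest ih =>
    intro d
    simp only [pvTally, pvPairs, List.foldl_append, List.foldl_map]
    exact ih _

theorem pvFoldT_eq (design : List (List Int)) : ∀ d,
    design.foldl pvTally d
      = (design.flatMap pvPairs).foldl (fun d k => d.insert k (d.getD k 0 + 1)) d := by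
  induction design with
  | nil => intro d; rfl
  | cons t rest ih =>
    intro d
    simp only [List.foldl_cons, List.flatMap_cons, List.foldl_append, pvTally_eq]
    exact ih _

-- A's loop over the pair list, started from a described matrix, adds 1 per pair at the normalized cell
theorem pvFoldA_fill (n : Nat) (P : List (Int × Int))
    (hP : ∀ p ∈ P, (-(n : Int) ≤ p.1 ∧ p.1 < (n : Int)) ∧ (-(n : Int) ≤ p.2 ∧ p.2 < (n : Int))) :
    ∀ G, P.foldl (fun acc p => pvBump (pvBump acc p.1 p.2) p.2 p.1) (pvFill n G)
      = pvFill n (fun k => G k + (P.countP (fun p => decide ((pvNorm n p.1, pvNorm n p.2) = k)) : Int)) := by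
  induction P with
  | nil => intro G; simp
  | cons p P' ih =>
    intro G
    have hp := hP p (by simp)
    have hstep : pvBump (pvBump (pvFill n G) p.1 p.2) p.2 p.1
        = pvFill n (fun k => if k = (pvNorm n p.1, pvNorm n p.2) then G k + 1 else G k) := by
      simp only [pvBump_eq_pvAdd]
      exact pvAdd2_fill n G p.1 p.2 1 hp.1 hp.2
    rw [List.foldl_cons, hstep, ih (fun q hq => hP q (by simp [hq]))]
    congr 1
    funext k
    rcases eq_or_ne k (pvNorm n p.1, pvNorm n p.2) with hk | hk
    · subst hk
      simp
      omega
    · have hk' : (pvNorm n p.1, pvNorm n p.2) ≠ k := fun h => hk h.symm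
      simp [hk, hk']

-- B's fill loop over (pair, count) items adds each count at the normalized cell
theorem pvFoldB_fill (n : Nat) (L : List ((Int × Int) × Int))
    (hL : ∀ x ∈ L, (-(n : Int) ≤ x.1.1 ∧ x.1.1 < (n : Int)) ∧ (-(n : Int) ≤ x.1.2 ∧ x.1.2 < (n : Int))) :
    ∀ G, L.foldl (fun m x => pvAdd (pvAdd m x.1.1 x.1.2 x.2) x.1.2 x.1.1 x.2) (pvFill n G)
      = pvFill n (fun k => G k + (L.map (fun x => if (pvNorm n x.1.1, pvNorm n x.1.2) = k then x.2 else 0)).sum) := by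
  induction L with
  | nil => intro G; simp
  | cons x L' ih =>
    intro G
    have hx := hL x (by simp)
    simp only [List.foldl_cons]
    rw [pvAdd2_fill n G x.1.1 x.1.2 x.2 hx.1 hx.2,
      ih (fun y hy => hL y (by simp [hy]))]
    congr 1
    funext k
    rcases eq_or_ne k (pvNorm n x.1.1, pvNorm n x.1.2) with hk | hk
    · subst hk
      simp [List.sum_cons]
      ring
    · have hk' : (pvNorm n x.1.1, pvNorm n x.1.2) ≠ k := fun h => hk h.symm
      simp [List.sum_cons, hk, hk']

-- summing each distinct element's multiplicity over a fiber recovers the fiber's total count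
theorem pvFiberSum {α : Type} [BEq α] [LawfulBEq α] (q : α → Prop) [DecidablePred q] :
    ∀ (S P : List α), S.Nodup → (∀ x, x ∈ S ↔ x ∈ P) →
    (S.map (fun x => if q x then (P.count x : Int) else 0)).sum
      = (P.countP (fun x => decide (q x)) : Int) := by
  intro S
  induction S with
  | nil =>
    intro P _ hmem
    have hP : P = [] := List.eq_nil_iff_forall_not_mem.mpr (fun x hx => by simpa using (hmem x).mpr hx)
    subst hP; simp
  | cons s S' ih =>
    intro P hnd hmem
    have hs' : s ∉ S' := (List.nodup_cons.mp hnd).1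
    set P' := P.filter (fun x => !(x == s)) with hP'
    have hmem' : ∀ x, x ∈ S' ↔ x ∈ P' := by
      intro x
      constructor
      · intro hx
        have hxs : x ≠ s := fun h => hs' (h ▸ hx)
        have : x ∈ P := (hmem x).mp (by simp [hx])
        simp [hP', List.mem_filter, this, hxs]
      · intro hx
        rw [hP', List.mem_filter] at hx
        have hxs : x ≠ s := by simpa using hx.2
        have := (hmem x).mpr hx.1
        simp at this
        tauto
    have hcount : ∀ x ∈ S', P.count x = P'.count x := by
      intro x hx
      have hxs : x ≠ s := fun h => hs' (h ▸ hx)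
      rw [hP', List.count_filter (by simpa using hxs)]
    have hsplit : (P.countP (fun x => decide (q x)) : Int)
        = (P'.countP (fun x => decide (q x)) : Int) + (if q s then (P.count s : Int) else 0) := by
      have hperm := List.filter_append_perm (fun x => x == s) P
      have h1 : P.countP (fun x => decide (q x))
          = (P.filter (fun x => x == s)).countP (fun x => decide (q x))
            + P'.countP (fun x => decide (q x)) := by
        rw [← List.countP_append, hperm.countP_eq]
      have h2 : (P.filter (fun x => x == s)) = List.replicate (P.count s) s := by
        simpa using (List.filter_beq s : P.filter (fun x => x == s) = _)
      have h3 : (List.replicate (P.count s) s).countP (fun x => decide (q x))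
          = if q s then P.count s else 0 := by
        induction (P.count s) with
        | zero => simp
        | succ c ihc =>
          simp only [List.replicate_succ, List.countP_cons, ihc]
          split_ifs <;> simp_all
      rw [h1, h2, h3]
      split_ifs <;> push_cast <;> ring
    have hrest : (S'.map (fun x => if q x then (P.count x : Int) else 0)).sum
        = (S'.map (fun x => if q x then (P'.count x : Int) else 0)).sum := by
      congr 1
      exact List.map_congr_left (fun x hx => by rw [hcount x hx])
    simp only [List.map_cons, List.sum_cons, hrest,
      ih P' (List.nodup_cons.mp hnd).2 hmem', hsplit]
    ring

theorem pvFill_zero (n : Nat) :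
    pvFill n (fun _ => (0 : Int)) = List.replicate n (List.replicate n (0 : Int)) := by
  simp [pvFill, pvGrid, List.map_const', List.length_range]

-- ===== VERDICT (by name: the statement is the Claim_ definition above) =====
theorem pair_cooccurrence_spec : Claim_equal_pair_cooccurrence := by
  intro design v _ hpre
  unfold Spec_pair_cooccurrence
  set n := (v + 1).toNat with hn
  set P := design.flatMap pvPairs with hPdef
  have hP : ∀ p ∈ P, (-(n : Int) ≤ p.1 ∧ p.1 < (n : Int)) ∧ (-(n : Int) ≤ p.2 ∧ p.2 < (n : Int)) := by
    intro p hp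
    rw [hPdef, List.mem_flatMap] at hp
    obtain ⟨t, ht, hpt⟩ := hp
    obtain ⟨hlen, h1, h2⟩ := pvPairs_mem hpt
    have b1 := hpre t ht hlen p.1 h1
    have b2 := hpre t ht hlen p.2 h2
    constructor <;> constructor <;> omega
  have hA : pair_cooccurrence design v
      = pvFill n (fun k => 0 + (P.countP (fun p => decide ((pvNorm n p.1, pvNorm n p.2) = k)) : Int)) := by
    simp only [pair_cooccurrence]
    rw [pvFoldA_eq, ← hn, ← pvFill_zero n, ← hPdef, pvFoldA_fill n P hP]
  have hcounter : design.foldl pvTally PySem.Dict.empty = PySem.Dict.counter P := by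
    rw [pvFoldT_eq, ← hPdef, PySem.Dict.foldl_insert_getD_add_one_eq_counter]
  have hB : pair_cooccurrence_alt design v
      = pvFill n (fun k => 0 + ((PySem.Set.ofList P).map
          (fun p => if (pvNorm n p.1, pvNorm n p.2) = k then (P.count p : Int) else 0)).sum) := by
    simp only [pair_cooccurrence_alt]
    rw [hcounter, ← hn, ← pvFill_zero n, PySem.Dict.items_counter]
    rw [pvFoldB_fill n _ (by
      intro x hx
      rw [List.mem_map] at hx
      obtain ⟨p, hpS, rfl⟩ := hx
      exact hP p ((PySem.Set.mem_ofList P p).mp hpS))]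
    congr 1
    funext k
    congr 1
    rw [List.map_map]
    rfl
  rw [hA, hB]
  congr 1
  funext k
  congr 1
  exact (pvFiberSum (fun p => (pvNorm n p.1, pvNorm n p.2) = k) (PySem.Set.ofList P) P
    (PySem.Set.nodup_ofList P) (fun x => PySem.Set.mem_ofList P x)).symm
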